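-- pv_equiv track=rewrite | github.com/FauveNoir/allumette | nim.py | marienbadInitialColumns
-- ===== SOURCE A (Python) =====
-- def marienbadInitialColumns(numberOfLines):
--     matchMatrix = []
--     columns = (numberOfLines*2)-1
--     number = 0
--     i = 1
--     while i <= columns:
--         if i <= (columns/2)+1:
--             number=number+1
--         else:
--             number=number-1
--         matchMatrix.append(number)
--         i=i+1
--
--     return matchMatrix
-- ===== SOURCE B (Python) =====
-- def marienbadInitialColumns(numberOfLines):
--     return list(range(1, numberOfLines + 1)) + list(range(numberOfLines - 1, 0, -1))
-- ===== Notes on version B (the rewrite author's own statement) =====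
-- stated objective: simpler
-- what changed: Replaces the stateful while-loop with a running counter by the direct concatenation of two range() halves (ascending 1..n and descending n-1..1).
import Mathlib
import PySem

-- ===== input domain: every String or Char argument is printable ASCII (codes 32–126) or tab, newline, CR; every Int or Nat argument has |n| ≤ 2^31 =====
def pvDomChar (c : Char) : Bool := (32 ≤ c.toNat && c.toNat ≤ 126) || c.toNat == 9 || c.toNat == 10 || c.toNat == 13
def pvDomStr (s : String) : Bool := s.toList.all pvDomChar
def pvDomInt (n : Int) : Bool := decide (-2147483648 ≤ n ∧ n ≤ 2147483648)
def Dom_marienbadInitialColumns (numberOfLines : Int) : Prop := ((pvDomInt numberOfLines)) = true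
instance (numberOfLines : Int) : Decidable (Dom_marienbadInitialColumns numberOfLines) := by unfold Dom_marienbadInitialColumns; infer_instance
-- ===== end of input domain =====

-- B builds the ramp as the concatenation of two ranges instead of A's while-loop
-- with a running counter; same cost, simpler decomposition (equivalence of the
-- RETURN value is what is proved).

-- ===== PORT A =====
-- A's while-loop over i = 1..columns, folded over that index range with state
-- (number, matchMatrix).  Python's test `i <= (columns/2)+1` uses float division;
-- with i and columns integers it is exactly `2*i <= columns + 2` (exact: 2·i is an
-- even integer compared against the same rational bound).
def pvStepA (columns : Int) (st : Int × List Int) (i : Int) : Int × List Int :=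
  let number := if 2 * i ≤ columns + 2 then st.1 + 1 else st.1 - 1
  (number, st.2 ++ [number])

def marienbadInitialColumns (numberOfLines : Int) : List Int :=
  let columns := numberOfLines * 2 - 1
  ((PySem.List.pyRange 1 (columns + 1) 1).foldl (pvStepA columns) (0, [])).2

-- ===== PORT B =====
def marienbadInitialColumns_alt (numberOfLines : Int) : List Int :=
  PySem.List.pyRange 1 (numberOfLines + 1) 1 ++ PySem.List.pyRange (numberOfLines - 1) 0 (-1)

-- ===== PRECONDITION & SPEC =====
def Spec_marienbadInitialColumns (numberOfLines : Int) (out : List Int) : Prop := out = marienbadInitialColumns_alt numberOfLines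
instance (numberOfLines : Int) (out : List Int) : Decidable (Spec_marienbadInitialColumns numberOfLines out) := by unfold Spec_marienbadInitialColumns; infer_instance

-- ===== CLAIM (what is proved, stated in full; the proofs are below) =====
def Claim_equal_marienbadInitialColumns : Prop := ∀ (numberOfLines : Int), Dom_marienbadInitialColumns numberOfLines → Spec_marienbadInitialColumns numberOfLines (marienbadInitialColumns numberOfLines)

-- ===== LEMMAS AND PROOFS =====

-- Ascending phase: while the branch condition holds, the fold appends num+1, num+2, …
theorem pvFoldA_up (c : Int) (k : Nat) : ∀ (a num : Int) (acc : List Int),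
    (∀ i : Int, a ≤ i → i < a + k → 2 * i ≤ c + 2) →
    (PySem.List.pyRange a (a + k) 1).foldl (pvStepA c) (num, acc)
      = (num + k, acc ++ PySem.List.pyRange (num + 1) (num + k + 1) 1) := by
  induction k with
  | zero =>
      intro a num acc _
      simp [PySem.List.pyRange_one_eq_nil (le_refl a)]
  | succ k ih =>
      intro a num acc h
      have hsplit : PySem.List.pyRange a (a + (k + 1 : Nat)) 1
          = PySem.List.pyRange a (a + k) 1 ++ [a + k] := by
        rw [show (a : Int) + (k + 1 : Nat) = (a + k) + 1 by push_cast; ring,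
          PySem.List.pyRange_one_succ_right (by omega)]
      rw [hsplit, List.foldl_append,
        ih a num acc (fun i h1 h2 => h i h1 (by push_cast at h2 ⊢; omega))]
      have hc := h (a + k) (by omega) (by push_cast; omega)
      simp only [List.foldl, pvStepA, if_pos hc, Prod.mk.injEq]
      refine ⟨by push_cast; ring, ?_⟩
      conv_rhs => rw [show (num + ((k:Nat)+1:Nat) + 1 : Int) = (num + (k:Int) + 1) + 1 from by
          push_cast; ring,
        PySem.List.pyRange_one_succ_right (show num + 1 ≤ num + (k:Int) + 1 by omega)]
      rw [List.append_assoc]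

-- Descending phase: while the branch condition fails, the fold appends num-1, num-2, …
theorem pvFoldA_down (c : Int) (k : Nat) : ∀ (a num : Int) (acc : List Int),
    (∀ i : Int, a ≤ i → i < a + k → ¬ (2 * i ≤ c + 2)) →
    (PySem.List.pyRange a (a + k) 1).foldl (pvStepA c) (num, acc)
      = (num - k, acc ++ (PySem.List.pyRange (num - k) num 1).reverse) := by
  induction k with
  | zero =>
      intro a num acc _
      simp [PySem.List.pyRange_one_eq_nil (le_refl a)]
  | succ k ih =>
      intro a num acc h
      have hsplit : PySem.List.pyRange a (a + (k + 1 : Nat)) 1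
          = PySem.List.pyRange a (a + k) 1 ++ [a + k] := by
        rw [show (a : Int) + (k + 1 : Nat) = (a + k) + 1 by push_cast; ring,
          PySem.List.pyRange_one_succ_right (by omega)]
      rw [hsplit, List.foldl_append,
        ih a num acc (fun i h1 h2 => h i h1 (by push_cast at h2 ⊢; omega))]
      have hc := h (a + k) (by omega) (by push_cast; omega)
      simp only [List.foldl, pvStepA, if_neg hc, Prod.mk.injEq]
      refine ⟨by push_cast; ring, ?_⟩
      conv_rhs => rw [show (num - ((k:Nat)+1:Nat) : Int) = num - (k:Int) - 1 from by
          push_cast; ring,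
        PySem.List.pyRange_one_cons (show num - (k:Int) - 1 < num by omega),
        List.reverse_cons]
      rw [List.append_assoc, show num - (k:Int) - 1 + 1 = num - (k:Int) by ring]

-- ===== VERDICT (by name: the statement is the Claim_ definition above) =====
theorem marienbadInitialColumns_spec : Claim_equal_marienbadInitialColumns := by
  intro n _
  unfold Spec_marienbadInitialColumns marienbadInitialColumns marienbadInitialColumns_alt
  show ((PySem.List.pyRange 1 ((n * 2 - 1) + 1) 1).foldl (pvStepA (n * 2 - 1)) (0, [])).2
      = PySem.List.pyRange 1 (n + 1) 1 ++ PySem.List.pyRange (n - 1) 0 (-1)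
  by_cases hn : n ≤ 0
  · rw [show n * 2 - 1 + 1 = n * 2 by ring,
      PySem.List.pyRange_one_eq_nil (show n * 2 ≤ 1 by omega),
      PySem.List.pyRange_one_eq_nil (show n + 1 ≤ 1 by omega),
      PySem.List.pyRange_neg_one_eq_nil (show n - 1 ≤ 0 by omega)]
    simp
  · rw [not_le] at hn
    have hsplit : PySem.List.pyRange 1 (n * 2 - 1 + 1) 1
        = PySem.List.pyRange 1 (n + 1) 1 ++ PySem.List.pyRange (n + 1) (n * 2) 1 := by
      rw [show n * 2 - 1 + 1 = n * 2 by ring]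
      exact PySem.List.pyRange_one_append 1 (n + 1) (n * 2) (by omega) (by omega)
    have h1 : PySem.List.pyRange 1 (n + 1) 1
        = PySem.List.pyRange 1 ((1 : Int) + (n.toNat : Int)) 1 := by
      rw [Int.toNat_of_nonneg (by omega)]; ring_nf
    have h2 : PySem.List.pyRange (n + 1) (n * 2) 1
        = PySem.List.pyRange (n + 1) ((n + 1) + ((n - 1).toNat : Int)) 1 := by
      rw [Int.toNat_of_nonneg (by omega)]; ring_nf
    rw [hsplit, List.foldl_append, h1]
    rw [pvFoldA_up (n * 2 - 1) n.toNat 1 0 [] (by intro i hi1 hi2; omega)]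
    rw [h2]
    rw [pvFoldA_down (n * 2 - 1) (n - 1).toNat (n + 1) _ _ (by intro i hi1 hi2; omega)]
    rw [PySem.List.pyRange_neg_one_eq_reverse,
      Int.toNat_of_nonneg (show (0:Int) ≤ n by omega),
      Int.toNat_of_nonneg (show (0:Int) ≤ n - 1 by omega)]
    norm_num
    rw [add_comm 1 n]
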